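-- pv_equiv track=rewrite | github.com/akhilkumar2004/CSC-520-Assignment-2 | og.py | compute_control
-- ===== SOURCE A (Python) =====
-- EMPTY_SQUARE = "."
--
-- N = 4
--
-- def orth_neighbors(r, c):
--     """
--     Inputs: The row (r) and column (c) of a square on the board.
--     Output: A list of all orthogonal neigbors (up, down, left, right).
--
--     Example (on a 4x4 board):
--     orth_neighbors(0, 0) -> [(0, 1), (1, 0)]
--     orth_neighbors(1, 1) -> [(0, 1), (1, 0), (1, 2), (2, 1)]
--
--
--     """
--     orth_result = []
--     if r > 0:
--         orth_result.append((r-1, c)) # Up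
--     if r < N-1:
--         orth_result.append((r+1, c)) # Down
--     if c > 0:
--         orth_result.append((r, c-1)) # Left
--     if c < N-1:
--         orth_result.append((r, c+1)) # Right
--     return orth_result
--
-- def compute_control(board):
--     """
--     Input: The current 4x4 board
--     Output: The control for the player
--
--     Rules for controlling:
--
--     1. A square is controlled if there is already a marble on that square.
--     2. An empty square is controlled by a player if all of its orthogonal neighbors are controlled by the same player.
--     3. This process would be repeated until no new squares can be claimed.
--     """
--     # Copies the board into 'control' (so the original board is not modified directly)
--     control  = [[board[r][c] for c in range(N)] for r in range(N)]
--
--     status = True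
--
--     # Repeat until no futher chages are possible
--     while status:
--         status = False
--         for r in range(N):
--             for c in range(N):
--                 # Get valyes of orthogonal neighbors
--                 if control[r][c] == EMPTY_SQUARE:
--                     # If all non-empty neighbors are the same value, fill the square
--                     neighbor_vals = [control[rr][cc] for rr, cc in orth_neighbors(r, c)]
--                     if neighbor_vals and all(val == neighbor_vals[0] and val != EMPTY_SQUARE for val in neighbor_vals):
--                         control[r][c] = neighbor_vals[0]
--                         status = True # A change was made so continue looping
--
--     # Return the updated board with updated values
--     return control
-- ===== SOURCE B (Python) =====
-- EMPTY_SQUARE = "."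
-- N = 4
--
-- def _next_val(grid, r, c):
--     v = grid[r][c]
--     if v != EMPTY_SQUARE:
--         return v
--     vals = [grid[rr][cc]
--             for rr, cc in ((r - 1, c), (r + 1, c), (r, c - 1), (r, c + 1))
--             if 0 <= rr < N and 0 <= cc < N]
--     w = vals[0]
--     if w != EMPTY_SQUARE and all(x == w for x in vals):
--         return w
--     return v
--
-- def compute_control(board):
--     grid = [row[:N] for row in board[:N]]
--     while True:
--         nxt = [[_next_val(grid, r, c) for c in range(N)] for r in range(N)]
--         if nxt == grid:
--             return grid
--         grid = nxt
-- ===== Notes on version B (the rewrite author's own statement) =====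
-- stated objective: alternative
-- what changed: A repeatedly rescans the grid mutating it in place (Gauss-Seidel with a change flag); B computes a fresh whole-grid snapshot step each round (Jacobi) and stops when the step is the identity -- equal by confluence of the monotone fill rule.
import Mathlib
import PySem

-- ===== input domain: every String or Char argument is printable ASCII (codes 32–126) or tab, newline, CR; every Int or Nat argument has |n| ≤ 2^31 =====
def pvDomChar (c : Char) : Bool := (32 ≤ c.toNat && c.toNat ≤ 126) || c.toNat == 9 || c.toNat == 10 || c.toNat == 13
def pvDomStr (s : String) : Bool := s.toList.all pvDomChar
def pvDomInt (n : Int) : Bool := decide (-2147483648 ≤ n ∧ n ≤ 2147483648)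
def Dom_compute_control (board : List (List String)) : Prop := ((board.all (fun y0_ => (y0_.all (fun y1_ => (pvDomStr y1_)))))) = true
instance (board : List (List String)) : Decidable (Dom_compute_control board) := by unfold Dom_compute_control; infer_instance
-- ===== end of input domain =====

-- B replaces A's repeated in-place full-grid rescans (Gauss–Seidel with a change flag) by
-- snapshot rounds: each round computes a whole new grid from the previous one (Jacobi) and the
-- loop stops when the round is the identity; the two fixpoints coincide (proved below).

-- ===== PORT A =====

-- board[r][c] / control[r][c]: indices here are always nonnegative and (by Pre_/construction)
-- in range, where Python indexing returns the element; getD is exact there.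
def pvGeti (g : List (List String)) (r c : Nat) : String := (g.getD r []).getD c ""

-- literal port of orth_neighbors (r, c always in 0..3 where A calls it; N = 4)
def orth_neighbors (r c : Nat) : List (Nat × Nat) :=
  (if 0 < r then [(r - 1, c)] else []) ++
  (if r < 3 then [(r + 1, c)] else []) ++
  (if 0 < c then [(r, c - 1)] else []) ++
  (if c < 3 then [(r, c + 1)] else [])

-- control[r][c] = v  (r < 4, c < 4, rows of length 4: List.set is exact)
def pvSetCell (g : List (List String)) (r c : Nat) (v : String) : List (List String) :=
  g.set r ((g.getD r []).set c v)

-- body of A's innermost loop, threading (control, status)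
def pvSweepCell (acc : List (List String) × Bool) (r c : Nat) : List (List String) × Bool :=
  if pvGeti acc.1 r c = "." then
    let vals := (orth_neighbors r c).map (fun p => pvGeti acc.1 p.1 p.2)
    if vals ≠ [] ∧ ∀ v ∈ vals, v = vals.getD 0 "" ∧ v ≠ "." then
      (pvSetCell acc.1 r c (vals.getD 0 ""), true)
    else acc
  else acc

-- one pass of the two nested for-loops, with status reset to False
def pvSweep (g : List (List String)) : List (List String) × Bool :=
  (List.range 4).foldl
    (fun acc r => (List.range 4).foldl (fun acc2 c => pvSweepCell acc2 r c) acc) (g, false)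

-- A's 'while status' loop.  Fuel 17 is exact: a pass reporting a change strictly decreases the
-- number of "." among the 16 cells (proved below), so at most 16 changing passes occur before
-- the terminating pass.
def pvLoopA : Nat → List (List String) → List (List String)
  | 0, g => g
  | fuel + 1, g =>
    let s := pvSweep g
    if s.2 then pvLoopA fuel s.1 else g

def compute_control (board : List (List String)) : List (List String) :=
  pvLoopA 17 ((List.range 4).map (fun r => (List.range 4).map (fun c => pvGeti board r c)))

-- ===== PORT B =====

-- _next_val of Source B; vals is nonempty for r, c in 0..3, where vals[0] is exact as getD 0 ""
def pvNextVal (g : List (List String)) (r c : Nat) : String :=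
  let v := pvGeti g r c
  if v ≠ "." then v
  else
    let cand : List (Int × Int) :=
      [((r : Int) - 1, (c : Int)), ((r : Int) + 1, (c : Int)),
       ((r : Int), (c : Int) - 1), ((r : Int), (c : Int) + 1)]
    let vals := (cand.filter (fun p => decide (0 ≤ p.1 ∧ p.1 < 4 ∧ 0 ≤ p.2 ∧ p.2 < 4))).map
      (fun p => pvGeti g p.1.toNat p.2.toNat)
    let w := vals.getD 0 ""
    if w ≠ "." ∧ ∀ x ∈ vals, x = w then w else v

-- one snapshot round: nxt = [[_next_val(grid, r, c) for c in range(N)] for r in range(N)]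
def pvStep (g : List (List String)) : List (List String) :=
  (List.range 4).map (fun r => (List.range 4).map (fun c => pvNextVal g r c))

-- Source B's 'while True' loop; fuel 17 is exact for the same counting reason as in A
def pvLoopJ : Nat → List (List String) → List (List String)
  | 0, g => g
  | fuel + 1, g =>
    let n := pvStep g
    if n = g then g else pvLoopJ fuel n

-- board[:4] / row[:4] with nonnegative bound is List.take, exactly
def compute_control_alt (board : List (List String)) : List (List String) :=
  pvLoopJ 17 ((board.take 4).map (fun row => row.take 4))

-- ===== PRECONDITION & SPEC =====
-- A raises IndexError unless the board has at least 4 rows whose first 4 rows each have at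
-- least 4 columns (it reads exactly board[r][c] for r, c in 0..3); Pre_ excludes only those
-- raising inputs.
def Pre_compute_control (board : List (List String)) : Prop :=
  4 ≤ board.length ∧ ∀ row ∈ board.take 4, 4 ≤ row.length
instance (board : List (List String)) : Decidable (Pre_compute_control board) := by
  unfold Pre_compute_control; infer_instance

def pvWitness_compute_control : List (List String) :=
  [["X", ".", ".", "O"], [".", ".", ".", "."], [".", ".", "X", "."], ["O", ".", ".", "."]]

def Spec_compute_control (board : List (List String)) (out : List (List String)) : Prop := out = compute_control_alt board
instance (board : List (List String)) (out : List (List String)) : Decidable (Spec_compute_control board out) := by unfold Spec_compute_control; infer_instance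

-- ===== CLAIM (what is proved, stated in full; the proofs are below) =====
def Claim_equal_compute_control : Prop := ∀ (board : List (List String)), Dom_compute_control board → Pre_compute_control board → Spec_compute_control board (compute_control board)

-- ===== LEMMAS AND PROOFS =====

-- proof-only vocabulary -------------------------------------------------------

def pvCells : List (Nat × Nat) :=
  (List.range 4).flatMap (fun r => (List.range 4).map (fun c => (r, c)))

def pvDim (g : List (List String)) : Prop := g.length = 4 ∧ ∀ row ∈ g, row.length = 4

def pvFillable (g : List (List String)) (r c : Nat) : Prop :=
  orth_neighbors r c ≠ [] ∧
    ∃ v, v ≠ "." ∧ ∀ p ∈ orth_neighbors r c, pvGeti g p.1 p.2 = v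

-- cells only go from "." to a value; values never change
def pvProg (x y : List (List String)) : Prop :=
  ∀ r c, r < 4 → c < 4 →
    pvGeti y r c = pvGeti x r c ∨ (pvGeti x r c = "." ∧ pvGeti y r c ≠ ".")

def pvLe (x y : List (List String)) : Prop :=
  ∀ r c, r < 4 → c < 4 → pvGeti x r c = pvGeti y r c ∨ pvGeti x r c = "."

def pvFix (y : List (List String)) : Prop :=
  ∀ r c, r < 4 → c < 4 → pvGeti y r c = "." → ¬ pvFillable y r c

-- every cell the process changed has all its neighbors equal to its (non-empty) value
def pvInv (s0 y : List (List String)) : Prop :=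
  ∀ r c, r < 4 → c < 4 → pvGeti y r c ≠ pvGeti s0 r c →
    (pvGeti y r c ≠ "." ∧ ∀ p ∈ orth_neighbors r c, pvGeti y p.1 p.2 = pvGeti y r c)

def pvGood (s0 y : List (List String)) : Prop := pvDim y ∧ pvProg s0 y ∧ pvInv s0 y

-- small facts ----------------------------------------------------------------

lemma pvOrth_lt {r c : Nat} (hr : r < 4) (hc : c < 4) :
    ∀ p ∈ orth_neighbors r c, p.1 < 4 ∧ p.2 < 4 := by
  intro p hp
  simp only [orth_neighbors, List.mem_append] at hp
  rcases hp with ((h | h) | h) | h <;> split_ifs at h <;>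
    simp_all <;> omega


lemma pvOrth_ne_self {r c : Nat} : ∀ p ∈ orth_neighbors r c, p ≠ (r, c) := by
  intro p hp
  simp only [orth_neighbors, List.mem_append] at hp
  rcases hp with ((h | h) | h) | h <;> split_ifs at h <;> simp_all <;>
    intro h' <;> omega


lemma pvOrth_ne_nil {r c : Nat} (hr : r < 4) (hc : c < 4) : orth_neighbors r c ≠ [] := by
  unfold orth_neighbors
  interval_cases r <;> interval_cases c <;> simp


lemma pvCells_lt : ∀ p ∈ pvCells, p.1 < 4 ∧ p.2 < 4 := by
  intro p hp
  simp only [pvCells, List.mem_flatMap, List.mem_map, List.mem_range] at hp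
  obtain ⟨r, hr, c, hc, rfl⟩ := hp
  exact ⟨hr, hc⟩


lemma pvMem_cells {r c : Nat} (hr : r < 4) (hc : c < 4) : (r, c) ∈ pvCells := by
  simp only [pvCells, List.mem_flatMap, List.mem_map, List.mem_range]
  exact ⟨r, hr, c, hc, rfl⟩


lemma pvProg_refl (x : List (List String)) : pvProg x x := by
  intro r c _ _; exact Or.inl rfl


lemma pvProg_trans {x y z : List (List String)} (h1 : pvProg x y) (h2 : pvProg y z) :
    pvProg x z := by
  intro r c hr hc
  rcases h2 r c hr hc with h2' | h2' <;> rcases h1 r c hr hc with h1' | h1'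
  · exact Or.inl (h2'.trans h1')
  · exact Or.inr ⟨h1'.1, h2' ▸ h1'.2⟩
  · exact Or.inr ⟨h1' ▸ h2'.1, h2'.2⟩
  · exact Or.inr ⟨h1'.1, h2'.2⟩


lemma pvProg_le {x y : List (List String)} (h : pvProg x y) : pvLe x y := by
  intro r c hr hc
  rcases h r c hr hc with h' | h'
  · exact Or.inl h'.symm
  · exact Or.inr h'.1


lemma pvGrid_ext {x y : List (List String)} (hx : pvDim x) (hy : pvDim y)
    (h : ∀ r c, r < 4 → c < 4 → pvGeti x r c = pvGeti y r c) : x = y := by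
  apply List.ext_getElem (by rw [hx.1, hy.1])
  intro i h1 h2
  have hi : i < 4 := by rwa [hx.1] at h1
  have hrx : x[i].length = 4 := hx.2 _ (List.getElem_mem h1)
  have hry : y[i].length = 4 := hy.2 _ (List.getElem_mem h2)
  apply List.ext_getElem (by rw [hrx, hry])
  intro j h3 h4
  have hj : j < 4 := by rwa [hrx] at h3
  have := h i j hi hj
  unfold pvGeti at this
  rwa [List.getD_eq_getElem _ _ h1, List.getD_eq_getElem _ _ h3,
    List.getD_eq_getElem _ _ h2, List.getD_eq_getElem _ _ h4] at this


lemma pvGeti_set {g : List (List String)} (hD : pvDim g) {r c : Nat} (hr : r < 4) (hc : c < 4)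
    (v : String) (r' c' : Nat) :
    pvGeti (pvSetCell g r c v) r' c' = if r' = r ∧ c' = c then v else pvGeti g r' c' := by
  have hrl : r < g.length := by rw [hD.1]; exact hr
  have hrow : (g.getD r []).length = 4 := by
    rw [List.getD_eq_getElem _ _ hrl]; exact hD.2 _ (List.getElem_mem hrl)
  unfold pvSetCell pvGeti
  by_cases hr' : r' = r
  · subst hr'
    have h1 : r' < (g.set r' ((g.getD r' []).set c v)).length := by simpa using hrl
    rw [List.getD_eq_getElem _ _ h1, List.getElem_set_self]
    by_cases hc' : c' = c
    · subst hc'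
      have h2 : c' < ((g.getD r' []).set c' v).length := by rw [List.length_set, hrow]; omega
      rw [List.getD_eq_getElem _ _ h2, List.getElem_set_self]
      simp
    · have hrw : ((g.getD r' []).set c v).getD c' "" = (g.getD r' []).getD c' "" := by
        simp only [List.getD_eq_getElem?_getD]
        rw [List.getElem?_set_ne (by omega : c ≠ c')]
      rw [hrw]
      simp [hc']
  · have hrw : (g.set r ((g.getD r []).set c v)).getD r' [] = g.getD r' [] := by
      simp only [List.getD_eq_getElem?_getD]
      rw [List.getElem?_set_ne (by omega : r ≠ r')]
    rw [hrw]
    simp [hr']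


lemma pvDim_set {g : List (List String)} (hD : pvDim g) {r : Nat} (hr : r < 4) (c : Nat)
    (v : String) : pvDim (pvSetCell g r c v) := by
  refine ⟨by simp [pvSetCell, hD.1], ?_⟩
  intro row hrow
  rcases List.mem_or_eq_of_mem_set hrow with h | h
  · exact hD.2 _ h
  · subst h
    rw [List.length_set]
    have hrl : r < g.length := by rw [hD.1]; exact hr
    rw [List.getD_eq_getElem _ _ hrl]
    exact hD.2 _ (List.getElem_mem hrl)


-- the central confluence fact: if y is a fixed invariant-respecting state above s0, then any
-- cell fillable with v in a state x between s0 and y carries value v in y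
lemma pvKey {s0 y x : List (List String)} (hFix : pvFix y) (hInv : pvInv s0 y)
    (hPy : pvProg s0 y) (hPx : pvProg s0 x) (hxy : pvLe x y) {r c : Nat} (hr : r < 4)
    (hc : c < 4) (hx : pvGeti x r c = ".") {v : String} (hv : v ≠ ".")
    (hall : ∀ p ∈ orth_neighbors r c, pvGeti x p.1 p.2 = v) : pvGeti y r c = v := by
  -- the neighbors carry v in y as well
  have hny : ∀ p ∈ orth_neighbors r c, pvGeti y p.1 p.2 = v := by
    intro p hp
    have hlt := pvOrth_lt hr hc p hp
    rcases hxy p.1 p.2 hlt.1 hlt.2 with h' | h'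
    · exact h' ▸ hall p hp
    · exact False.elim (hv ((hall p hp).symm.trans h'))
  -- y's cell is not empty
  have hyne : pvGeti y r c ≠ "." := by
    intro h0
    exact hFix r c hr hc h0 ⟨pvOrth_ne_nil hr hc, v, hv, hny⟩
  -- y's cell differs from s0's
  have hs0 : pvGeti y r c ≠ pvGeti s0 r c := by
    intro h0
    rcases hPx r c hr hc with h1 | h1
    · rcases hPy r c hr hc with h2 | h2
      · exact hyne (h2.trans (h1.symm.trans hx))
      · exact hyne (h0.trans h2.1)
    · rcases hPy r c hr hc with h2 | h2
      · exact hyne (h2.trans h1.1)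
      · exact hyne (h0.trans h2.1)
  obtain ⟨-, hnb⟩ := hInv r c hr hc hs0
  obtain ⟨p0, hp0⟩ := List.exists_mem_of_ne_nil _ (pvOrth_ne_nil hr hc)
  have := hnb p0 hp0
  rw [hny p0 hp0] at this
  exact this.symm


-- a single fill preserves pvGood and pvLe · y
lemma pvFill_good {s0 g : List (List String)} (hG : pvGood s0 g) {r c : Nat} (hr : r < 4)
    (hc : c < 4) {v : String} (hv : v ≠ ".") (he : pvGeti g r c = ".")
    (hall : ∀ p ∈ orth_neighbors r c, pvGeti g p.1 p.2 = v) :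
    pvGood s0 (pvSetCell g r c v) := by
  obtain ⟨hD, hP, hI⟩ := hG
  have hset := fun r' c' => pvGeti_set hD hr hc v r' c'
  refine ⟨pvDim_set hD hr c v, ?_, ?_⟩
  · -- pvProg s0 (set)
    intro r' c' hr' hc'
    rw [hset r' c']
    by_cases hq : r' = r ∧ c' = c
    · obtain ⟨rfl, rfl⟩ := hq
      have hcc : r' = r' ∧ c' = c' := ⟨rfl, rfl⟩
      rw [if_pos hcc]
      right
      refine ⟨?_, hv⟩
      rcases hP r' c' hr' hc' with h1 | h1
      · exact h1 ▸ he
      · exact h1.1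
    · rw [if_neg hq]; exact hP r' c' hr' hc'
  · -- pvInv s0 (set)
    intro r' c' hr' hc' hne
    rw [hset r' c'] at hne
    by_cases hq : r' = r ∧ c' = c
    · obtain ⟨rfl, rfl⟩ := hq
      have hcc : r' = r' ∧ c' = c' := ⟨rfl, rfl⟩
      rw [hset r' c', if_pos hcc]
      refine ⟨hv, ?_⟩
      intro p hp
      rw [hset p.1 p.2, if_neg (by
        rintro ⟨h1, h2⟩
        exact pvOrth_ne_self p hp (by rw [← h1, ← h2]))]
      exact hall p hp
    · rw [if_neg hq] at hne
      obtain ⟨h1, h2⟩ := hI r' c' hr' hc' hne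
      rw [hset r' c', if_neg hq]
      refine ⟨h1, ?_⟩
      intro p hp
      rw [hset p.1 p.2]
      rw [if_neg (by
        rintro ⟨hp1, hp2⟩
        have := h2 p hp
        rw [hp1, hp2, he] at this
        exact h1 this.symm)]
      exact h2 p hp


lemma pvFill_prog {g : List (List String)} (hD : pvDim g) {r c : Nat} (hr : r < 4) (hc : c < 4)
    {v : String} (hv : v ≠ ".") (he : pvGeti g r c = ".") :
    pvProg g (pvSetCell g r c v) := by
  intro r' c' hr' hc'
  rw [pvGeti_set hD hr hc v r' c']
  by_cases hq : r' = r ∧ c' = c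
  · obtain ⟨rfl, rfl⟩ := hq
    have hcc : r' = r' ∧ c' = c' := ⟨rfl, rfl⟩
    rw [if_pos hcc]
    exact Or.inr ⟨he, hv⟩
  · rw [if_neg hq]; exact Or.inl rfl


lemma pvFill_le {s0 g y : List (List String)} (hD : pvDim g) (hy : pvGood s0 y) (hFix : pvFix y)
    {r c : Nat} (hr : r < 4) (hc : c < 4) {v : String} (hv : v ≠ ".")
    (he : pvGeti g r c = ".") (hall : ∀ p ∈ orth_neighbors r c, pvGeti g p.1 p.2 = v)
    (hPx : pvProg s0 g) (hxy : pvLe g y) : pvLe (pvSetCell g r c v) y := by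
  have hyv := pvKey hFix hy.2.2 hy.2.1 hPx hxy hr hc he hv hall
  intro r' c' hr' hc'
  rw [pvGeti_set hD hr hc v r' c']
  by_cases hq : r' = r ∧ c' = c
  · obtain ⟨rfl, rfl⟩ := hq
    have hcc : r' = r' ∧ c' = c' := ⟨rfl, rfl⟩
    rw [if_pos hcc]
    exact Or.inl hyv.symm
  · rw [if_neg hq]; exact hxy r' c' hr' hc'


-- A-side: the sweep ----------------------------------------------------------

lemma pvSweepCell_cases (g : List (List String)) (st : Bool) {r c : Nat} (_hr : r < 4)
    (_hc : c < 4) :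
    (pvSweepCell (g, st) r c = (g, st) ∧ ¬ (pvGeti g r c = "." ∧ pvFillable g r c)) ∨
    (∃ v, v ≠ "." ∧ pvGeti g r c = "." ∧ (∀ p ∈ orth_neighbors r c, pvGeti g p.1 p.2 = v) ∧
      pvSweepCell (g, st) r c = (pvSetCell g r c v, true)) := by
  unfold pvSweepCell
  dsimp only
  by_cases h1 : pvGeti g r c = "."
  · rw [if_pos h1]
    by_cases h2 : (orth_neighbors r c).map (fun p => pvGeti g p.1 p.2) ≠ [] ∧
        ∀ v ∈ (orth_neighbors r c).map (fun p => pvGeti g p.1 p.2),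
          v = ((orth_neighbors r c).map (fun p => pvGeti g p.1 p.2)).getD 0 "" ∧ v ≠ "."
    · right
      refine ⟨((orth_neighbors r c).map (fun p => pvGeti g p.1 p.2)).getD 0 "", ?_, h1, ?_, ?_⟩
      · have hmem : ((orth_neighbors r c).map (fun p => pvGeti g p.1 p.2)).getD 0 "" ∈
            (orth_neighbors r c).map (fun p => pvGeti g p.1 p.2) := by
          rcases hn : (orth_neighbors r c).map (fun p => pvGeti g p.1 p.2) with - | ⟨a, t⟩
          · exact absurd hn h2.1
          · rw [hn]; simp
        exact (h2.2 _ hmem).2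
      · intro p hp
        exact (h2.2 _ (List.mem_map_of_mem hp)).1
      · rw [if_pos h2]
    · left
      rw [if_neg h2]
      refine ⟨rfl, ?_⟩
      rintro ⟨-, hne, v, hv, hall⟩
      apply h2
      have hmapne : (orth_neighbors r c).map (fun p => pvGeti g p.1 p.2) ≠ [] := by
        simpa using hne
      obtain ⟨p0, t, hpt⟩ := List.exists_cons_of_ne_nil hne
      have hget : ((orth_neighbors r c).map (fun p => pvGeti g p.1 p.2)).getD 0 "" = v := by
        rw [hpt]
        simp [hall p0 (by rw [hpt]; exact List.mem_cons_self ..)]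
      refine ⟨hmapne, ?_⟩
      intro x hx
      obtain ⟨p, hp, rfl⟩ := List.mem_map.mp hx
      rw [hget]
      exact ⟨hall p hp, by rw [hall p hp]; exact hv⟩
  · rw [if_neg h1]
    exact Or.inl ⟨rfl, fun h => h1 h.1⟩


lemma pvSweep_eq_fold (g : List (List String)) :
    pvSweep g = pvCells.foldl (fun acc p => pvSweepCell acc p.1 p.2) (g, false) := by
  simp only [pvSweep, pvCells, List.foldl_flatMap, List.foldl_map]


lemma pvSweepFold_true (l : List (Nat × Nat)) :
    ∀ g : List (List String), (l.foldl (fun acc p => pvSweepCell acc p.1 p.2) (g, true)).2 = true := by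
  induction l with
  | nil => intro g; rfl
  | cons p t ih =>
    intro g
    have h : (pvSweepCell (g, true) p.1 p.2).2 = true := by
      unfold pvSweepCell; dsimp only; split_ifs <;> rfl
    rw [List.foldl_cons]
    rcases hsurj : pvSweepCell (g, true) p.1 p.2 with ⟨g', st'⟩
    rw [hsurj] at h
    cases st'
    · cases h
    · exact ih g'


lemma pvSweepFold_basic (s0 : List (List String)) (l : List (Nat × Nat))
    (hl : ∀ p ∈ l, p.1 < 4 ∧ p.2 < 4) :
    ∀ g st, pvGood s0 g →
      pvGood s0 (l.foldl (fun acc p => pvSweepCell acc p.1 p.2) (g, st)).1 ∧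
      pvProg g (l.foldl (fun acc p => pvSweepCell acc p.1 p.2) (g, st)).1 := by
  induction l with
  | nil => intro g st hG; exact ⟨hG, pvProg_refl g⟩
  | cons p t ih =>
    intro g st hG
    have hp4 := hl p (List.mem_cons_self ..)
    have hl' : ∀ q ∈ t, q.1 < 4 ∧ q.2 < 4 := fun q hq => hl q (List.mem_cons_of_mem _ hq)
    rw [List.foldl_cons]
    rcases pvSweepCell_cases g st hp4.1 hp4.2 with ⟨heq, -⟩ | ⟨v, hv, he, hall, heq⟩
    · rw [heq]
      exact ih hl' g st hG
    · rw [heq]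
      have hG' := pvFill_good hG hp4.1 hp4.2 hv he hall
      obtain ⟨h1, h2⟩ := ih hl' _ true hG'
      exact ⟨h1, pvProg_trans (pvFill_prog hG.1 hp4.1 hp4.2 hv he) h2⟩


lemma pvSweepFold_le (s0 y : List (List String)) (hy : pvGood s0 y) (hFix : pvFix y)
    (l : List (Nat × Nat)) (hl : ∀ p ∈ l, p.1 < 4 ∧ p.2 < 4) :
    ∀ g st, pvGood s0 g → pvLe g y →
      pvLe (l.foldl (fun acc p => pvSweepCell acc p.1 p.2) (g, st)).1 y := by
  induction l with
  | nil => intro g st hG hLe; exact hLe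
  | cons p t ih =>
    intro g st hG hLe
    have hp4 := hl p (List.mem_cons_self ..)
    have hl' : ∀ q ∈ t, q.1 < 4 ∧ q.2 < 4 := fun q hq => hl q (List.mem_cons_of_mem _ hq)
    rw [List.foldl_cons]
    rcases pvSweepCell_cases g st hp4.1 hp4.2 with ⟨heq, -⟩ | ⟨v, hv, he, hall, heq⟩
    · rw [heq]
      exact ih hl' g st hG hLe
    · rw [heq]
      have hG' := pvFill_good hG hp4.1 hp4.2 hv he hall
      have hLe' := pvFill_le hG.1 hy hFix hp4.1 hp4.2 hv he hall hG.2.1 hLe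
      exact ih hl' _ true hG' hLe'


lemma pvSweepFold_false (l : List (Nat × Nat)) (hl : ∀ p ∈ l, p.1 < 4 ∧ p.2 < 4) :
    ∀ g st, (l.foldl (fun acc p => pvSweepCell acc p.1 p.2) (g, st)).2 = false →
      st = false ∧ (l.foldl (fun acc p => pvSweepCell acc p.1 p.2) (g, st)).1 = g ∧
      ∀ p ∈ l, ¬ (pvGeti g p.1 p.2 = "." ∧ pvFillable g p.1 p.2) := by
  induction l with
  | nil => intro g st hfalse; exact ⟨hfalse, rfl, by simp⟩
  | cons p t ih =>
    intro g st hfalse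
    have hp4 := hl p (List.mem_cons_self ..)
    have hl' : ∀ q ∈ t, q.1 < 4 ∧ q.2 < 4 := fun q hq => hl q (List.mem_cons_of_mem _ hq)
    rw [List.foldl_cons] at hfalse
    rcases pvSweepCell_cases g st hp4.1 hp4.2 with ⟨heq, hnf⟩ | ⟨v, hv, he, hall, heq⟩
    · rw [heq] at hfalse
      obtain ⟨h1, h2, h3⟩ := ih hl' g st hfalse
      refine ⟨h1, by rw [List.foldl_cons, heq]; exact h2, ?_⟩
      intro q hq
      rcases List.mem_cons.mp hq with rfl | hq'
      · exact hnf
      · exact h3 q hq'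
    · rw [heq] at hfalse
      rw [pvSweepFold_true t _] at hfalse
      cases hfalse


lemma pvSweepFold_change (s0 : List (List String)) (l : List (Nat × Nat))
    (hl : ∀ p ∈ l, p.1 < 4 ∧ p.2 < 4) :
    ∀ g, pvGood s0 g → (l.foldl (fun acc p => pvSweepCell acc p.1 p.2) (g, false)).2 = true →
      ∃ r c, r < 4 ∧ c < 4 ∧ pvGeti g r c = "." ∧
        pvGeti (l.foldl (fun acc p => pvSweepCell acc p.1 p.2) (g, false)).1 r c ≠ "." := by
  induction l with
  | nil => intro g hG h; cases h
  | cons p t ih =>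
    intro g hG htrue
    have hp4 := hl p (List.mem_cons_self ..)
    have hl' : ∀ q ∈ t, q.1 < 4 ∧ q.2 < 4 := fun q hq => hl q (List.mem_cons_of_mem _ hq)
    rw [List.foldl_cons] at htrue ⊢
    rcases pvSweepCell_cases g false hp4.1 hp4.2 with ⟨heq, -⟩ | ⟨v, hv, he, hall, heq⟩
    · rw [heq] at htrue ⊢
      exact ih hl' g hG htrue
    · rw [heq]
      refine ⟨p.1, p.2, hp4.1, hp4.2, he, ?_⟩
      have hG' := pvFill_good hG hp4.1 hp4.2 hv he hall
      have hprog := (pvSweepFold_basic _ t hl' _ true hG').2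
      have hset : pvGeti (pvSetCell g p.1 p.2 v) p.1 p.2 = v := by
        rw [pvGeti_set hG.1 hp4.1 hp4.2 v p.1 p.2]
        have hcc : p.1 = p.1 ∧ p.2 = p.2 := ⟨rfl, rfl⟩
        rw [if_pos hcc]
      rcases hprog p.1 p.2 hp4.1 hp4.2 with h' | h'
      · rw [h', hset]; exact hv
      · exact h'.2


-- counting -------------------------------------------------------------------

def pvEmptyCount (g : List (List String)) : Nat :=
  pvCells.countP (fun p => pvGeti g p.1 p.2 == ".")

lemma pvCountP_lt {α : Type} (l : List α) (p q : α → Bool) (h : ∀ a ∈ l, p a = true → q a = true)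
    (a : α) (ha : a ∈ l) (hqa : q a = true) (hpa : p a = false) :
    l.countP p < l.countP q := by
  induction l with
  | nil => cases ha
  | cons b l ih =>
    have htail : ∀ a ∈ l, p a = true → q a = true :=
      fun a ha' h' => h a (List.mem_cons_of_mem _ ha') h'
    rcases List.mem_cons.mp ha with rfl | hb
    · rw [List.countP_cons, List.countP_cons, hpa, hqa]
      have hm := List.countP_mono_left (l := l) htail
      simp only [Bool.false_eq_true, if_false, if_true]
      omega
    · have hlt := ih htail hb
      rw [List.countP_cons, List.countP_cons]
      refine Nat.add_lt_add_of_lt_of_le hlt ?_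
      by_cases hpb : p b = true
      · simp [hpb, h b (List.mem_cons_self ..) hpb]
      · simp [hpb]

lemma pvEmptyCount_lt {x y : List (List String)} (hP : pvProg x y) {r c : Nat} (hr : r < 4)
    (hc : c < 4) (hx : pvGeti x r c = ".") (hy : pvGeti y r c ≠ ".") :
    pvEmptyCount y < pvEmptyCount x := by
  refine pvCountP_lt _ _ _ ?_ (r, c) (pvMem_cells hr hc) (by simpa using hx) (by simpa using hy)
  intro p hp h'
  have hlt := pvCells_lt p hp
  simp only [beq_iff_eq] at h' ⊢
  rcases hP p.1 p.2 hlt.1 hlt.2 with h2 | h2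
  · exact h2 ▸ h'
  · exact absurd h' h2.2

lemma pvEmptyCount_le (g : List (List String)) : pvEmptyCount g ≤ 16 := by
  exact le_trans List.countP_le_length (by decide)


-- A's loop -------------------------------------------------------------------

lemma pvLoopA_basic (s0 : List (List String)) :
    ∀ fuel g, pvGood s0 g → pvEmptyCount g < fuel →
      pvGood s0 (pvLoopA fuel g) ∧ pvFix (pvLoopA fuel g) := by
  intro fuel
  induction fuel with
  | zero => intro g hG hcnt; cases hcnt
  | succ n ih =>
    intro g hG hcnt
    simp only [pvLoopA]
    rcases hst : (pvSweep g).2 with - | -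
    · rw [if_neg Bool.false_ne_true]
      refine ⟨hG, ?_⟩
      intro r c hr hc he hF
      rw [pvSweep_eq_fold] at hst
      exact (pvSweepFold_false pvCells pvCells_lt g false hst).2.2 (r, c)
        (pvMem_cells hr hc) ⟨he, hF⟩
    · rw [if_pos rfl]
      rw [pvSweep_eq_fold] at hst ⊢
      have hG' := (pvSweepFold_basic s0 pvCells pvCells_lt g false hG).1
      obtain ⟨r, c, hr, hc, he, hne⟩ := pvSweepFold_change s0 pvCells pvCells_lt g hG hst
      have hprog := (pvSweepFold_basic s0 pvCells pvCells_lt g false hG).2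
      have hlt := pvEmptyCount_lt hprog hr hc he hne
      exact ih _ hG' (by omega)


lemma pvLoopA_le (s0 y : List (List String)) (hy : pvGood s0 y) (hFix : pvFix y) :
    ∀ fuel g, pvGood s0 g → pvLe g y → pvLe (pvLoopA fuel g) y := by
  intro fuel
  induction fuel with
  | zero => intro g hG hLe; exact hLe
  | succ n ih =>
    intro g hG hLe
    simp only [pvLoopA]
    rcases hst : (pvSweep g).2 with - | -
    · rw [if_neg Bool.false_ne_true]
      exact hLe
    · rw [if_pos rfl]
      rw [pvSweep_eq_fold]
      have hG' := (pvSweepFold_basic s0 pvCells pvCells_lt g false hG).1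
      have hLe' := pvSweepFold_le s0 y hy hFix pvCells pvCells_lt g false hG hLe
      exact ih _ hG' hLe'


-- B-side: the snapshot step --------------------------------------------------

lemma pvCand_eq {r c : Nat} (hr : r < 4) (hc : c < 4) :
    (([((r : Int) - 1, (c : Int)), ((r : Int) + 1, (c : Int)),
        ((r : Int), (c : Int) - 1), ((r : Int), (c : Int) + 1)].filter
      (fun p => decide (0 ≤ p.1 ∧ p.1 < 4 ∧ 0 ≤ p.2 ∧ p.2 < 4))).map
        (fun p => (p.1.toNat, p.2.toNat))) = orth_neighbors r c := by
  interval_cases r <;> interval_cases c <;> decide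

lemma pvStep_geti (g : List (List String)) {r c : Nat} (hr : r < 4) (hc : c < 4) :
    pvGeti (pvStep g) r c = pvNextVal g r c := by
  unfold pvStep pvGeti
  have h1 : ((List.range 4).map
      (fun r => (List.range 4).map (fun c => pvNextVal g r c))).getD r [] =
      (List.range 4).map (fun c => pvNextVal g r c) := by
    rw [List.getD_eq_getElem _ _ (by simpa using hr)]
    simp
  rw [h1, List.getD_eq_getElem _ _ (by simpa using hc)]
  simp


lemma pvDim_step (g : List (List String)) : pvDim (pvStep g) := by
  refine ⟨by simp [pvStep], ?_⟩
  intro row hrow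
  simp only [pvStep, List.mem_map, List.mem_range] at hrow
  obtain ⟨r, -, rfl⟩ := hrow
  simp


lemma pvNextVal_cases (g : List (List String)) {r c : Nat} (hr : r < 4) (hc : c < 4) :
    (pvNextVal g r c = pvGeti g r c ∧ ¬ (pvGeti g r c = "." ∧ pvFillable g r c)) ∨
    (∃ v, v ≠ "." ∧ pvGeti g r c = "." ∧ (∀ p ∈ orth_neighbors r c, pvGeti g p.1 p.2 = v) ∧
      pvNextVal g r c = v) := by
  unfold pvNextVal
  dsimp only
  by_cases h1 : pvGeti g r c ≠ "."
  · rw [if_pos h1]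
    exact Or.inl ⟨rfl, fun h => h1 h.1⟩
  · push Not at h1
    rw [if_neg (by rw [h1]; simp)]
    have hvals : ([((r : Int) - 1, (c : Int)), ((r : Int) + 1, (c : Int)),
        ((r : Int), (c : Int) - 1), ((r : Int), (c : Int) + 1)].filter
      (fun p => decide (0 ≤ p.1 ∧ p.1 < 4 ∧ 0 ≤ p.2 ∧ p.2 < 4))).map
        (fun p => pvGeti g p.1.toNat p.2.toNat) =
        (orth_neighbors r c).map (fun p => pvGeti g p.1 p.2) := by
      have := congrArg (List.map (fun q : Nat × Nat => pvGeti g q.1 q.2)) (pvCand_eq hr hc)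
      rw [List.map_map] at this
      exact this
    rw [hvals]
    by_cases h2 : ((orth_neighbors r c).map (fun p => pvGeti g p.1 p.2)).getD 0 "" ≠ "." ∧
        ∀ x ∈ (orth_neighbors r c).map (fun p => pvGeti g p.1 p.2),
          x = ((orth_neighbors r c).map (fun p => pvGeti g p.1 p.2)).getD 0 ""
    · right
      refine ⟨((orth_neighbors r c).map (fun p => pvGeti g p.1 p.2)).getD 0 "",
        h2.1, h1, ?_, by rw [if_pos h2]⟩
      intro p hp
      exact h2.2 _ (List.mem_map_of_mem hp)
    · left
      rw [if_neg h2]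
      refine ⟨rfl, ?_⟩
      rintro ⟨-, hne, v, hv, hall⟩
      apply h2
      obtain ⟨p0, t, hpt⟩ := List.exists_cons_of_ne_nil hne
      have hget : ((orth_neighbors r c).map (fun p => pvGeti g p.1 p.2)).getD 0 "" = v := by
        rw [hpt]
        simp [hall p0 (by rw [hpt]; exact List.mem_cons_self ..)]
      rw [hget]
      refine ⟨hv, ?_⟩
      intro x hx
      obtain ⟨p, hp, rfl⟩ := List.mem_map.mp hx
      exact hall p hp


lemma pvStep_good {s0 g : List (List String)} (hG : pvGood s0 g) : pvGood s0 (pvStep g) := by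
  obtain ⟨hD, hP, hI⟩ := hG
  refine ⟨pvDim_step g, ?_, ?_⟩
  · intro r c hr hc
    rw [pvStep_geti g hr hc]
    rcases pvNextVal_cases g hr hc with ⟨heq, -⟩ | ⟨v, hv, he, -, heq⟩
    · rw [heq]; exact hP r c hr hc
    · rw [heq]
      right
      refine ⟨?_, hv⟩
      rcases hP r c hr hc with h' | h'
      · exact h' ▸ he
      · exact h'.1
  · intro r c hr hc hne
    rw [pvStep_geti g hr hc] at hne ⊢
    rcases pvNextVal_cases g hr hc with ⟨heq, -⟩ | ⟨v, hv, he, hall, heq⟩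
    · rw [heq] at hne ⊢
      obtain ⟨h1, h2⟩ := hI r c hr hc hne
      refine ⟨h1, ?_⟩
      intro p hp
      have hp4 := pvOrth_lt hr hc p hp
      rw [pvStep_geti g hp4.1 hp4.2]
      rcases pvNextVal_cases g hp4.1 hp4.2 with ⟨heq', -⟩ | ⟨u, -, he', -, -⟩
      · rw [heq']; exact h2 p hp
      · exact absurd (h2 p hp) (by rw [he']; exact fun h => h1 h.symm)
    · rw [heq]
      refine ⟨hv, ?_⟩
      intro p hp
      have hp4 := pvOrth_lt hr hc p hp
      rw [pvStep_geti g hp4.1 hp4.2]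
      rcases pvNextVal_cases g hp4.1 hp4.2 with ⟨heq', -⟩ | ⟨u, -, he', -, -⟩
      · rw [heq']; exact hall p hp
      · exact absurd (hall p hp) (by rw [he']; exact fun h => hv h.symm)


lemma pvStep_prog (g : List (List String)) : pvProg g (pvStep g) := by
  intro r c hr hc
  rw [pvStep_geti g hr hc]
  rcases pvNextVal_cases g hr hc with ⟨heq, -⟩ | ⟨v, hv, he, -, heq⟩
  · rw [heq]; exact Or.inl rfl
  · rw [heq]; exact Or.inr ⟨he, hv⟩


lemma pvStep_le {s0 g y : List (List String)} (hy : pvGood s0 y) (hFix : pvFix y)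
    (hG : pvGood s0 g) (hxy : pvLe g y) : pvLe (pvStep g) y := by
  intro r c hr hc
  rw [pvStep_geti g hr hc]
  rcases pvNextVal_cases g hr hc with ⟨heq, -⟩ | ⟨v, hv, he, hall, heq⟩
  · rw [heq]; exact hxy r c hr hc
  · rw [heq]
    exact Or.inl (pvKey hFix hy.2.2 hy.2.1 hG.2.1 hxy hr hc he hv hall).symm


lemma pvStep_fix {g : List (List String)} (h : pvStep g = g) : pvFix g := by
  intro r c hr hc he hF
  rcases pvNextVal_cases g hr hc with ⟨-, hnf⟩ | ⟨v, hv, -, -, heq⟩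
  · exact hnf ⟨he, hF⟩
  · have : pvGeti g r c = pvNextVal g r c := by rw [← pvStep_geti g hr hc, h]
    rw [he, heq] at this
    exact hv this.symm


lemma pvStep_change {g : List (List String)} (hD : pvDim g) (h : pvStep g ≠ g) :
    ∃ r c, r < 4 ∧ c < 4 ∧ pvGeti g r c = "." ∧ pvGeti (pvStep g) r c ≠ "." := by
  by_contra h'
  push Not at h'
  apply h
  apply pvGrid_ext (pvDim_step g) hD
  intro r c hr hc
  rw [pvStep_geti g hr hc]
  rcases pvNextVal_cases g hr hc with ⟨heq, -⟩ | ⟨v, hv, he, -, heq⟩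
  · exact heq
  · exfalso
    apply hv
    have := h' r c hr hc he
    rw [pvStep_geti g hr hc, heq] at this
    exact this


-- B's loop -------------------------------------------------------------------

lemma pvLoopJ_basic (s0 : List (List String)) :
    ∀ fuel g, pvGood s0 g → pvEmptyCount g < fuel →
      pvGood s0 (pvLoopJ fuel g) ∧ pvFix (pvLoopJ fuel g) := by
  intro fuel
  induction fuel with
  | zero => intro g hG hcnt; cases hcnt
  | succ n ih =>
    intro g hG hcnt
    simp only [pvLoopJ]
    by_cases hng : pvStep g = g
    · rw [if_pos hng]
      exact ⟨hG, pvStep_fix hng⟩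
    · rw [if_neg hng]
      obtain ⟨r, c, hr, hc, he, hne⟩ := pvStep_change hG.1 hng
      have hlt := pvEmptyCount_lt (pvStep_prog g) hr hc he hne
      exact ih _ (pvStep_good hG) (by omega)


lemma pvLoopJ_le (s0 y : List (List String)) (hy : pvGood s0 y) (hFix : pvFix y) :
    ∀ fuel g, pvGood s0 g → pvLe g y → pvLe (pvLoopJ fuel g) y := by
  intro fuel
  induction fuel with
  | zero => intro g hG hLe; exact hLe
  | succ n ih =>
    intro g hG hLe
    simp only [pvLoopJ]
    by_cases hng : pvStep g = g
    · rw [if_pos hng]; exact hLe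
    · rw [if_neg hng]
      exact ih _ (pvStep_good hG) (pvStep_le hy hFix hG hLe)


-- the two starting copies agree under Pre_ ------------------------------------

lemma pvCopy_dim (board : List (List String)) :
    pvDim ((List.range 4).map (fun r => (List.range 4).map (fun c => pvGeti board r c))) := by
  refine ⟨by simp, ?_⟩
  intro row hrow
  simp only [List.mem_map, List.mem_range] at hrow
  obtain ⟨r, -, rfl⟩ := hrow
  simp


lemma pvCopy_eq {board : List (List String)} (h : Pre_compute_control board) :
    (board.take 4).map (fun row => row.take 4) =
      (List.range 4).map (fun r => (List.range 4).map (fun c => pvGeti board r c)) := by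
  obtain ⟨h1, h2⟩ := h
  apply List.ext_getElem (by simp; omega)
  intro i hi1 hi2
  have hi : i < 4 := by simpa using hi2
  have hib : i < board.length := by omega
  rw [List.getElem_map, List.getElem_map, List.getElem_take, List.getElem_range]
  have hrow : 4 ≤ board[i].length := by
    have hti : i < (board.take 4).length := by simp [hib]; try omega
    have he : (board.take 4)[i] = board[i] := List.getElem_take
    have := h2 _ (List.getElem_mem hti)
    rwa [he] at this
  apply List.ext_getElem (by simp [hrow]; try omega)
  intro j hj1 hj2
  have hj : j < 4 := by simpa using hj2
  rw [List.getElem_take, List.getElem_map, List.getElem_range]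
  unfold pvGeti
  rw [List.getD_eq_getElem _ _ hib, List.getD_eq_getElem _ _ (by omega)]


lemma pvLe_antisymm {x y : List (List String)} (hx : pvDim x) (hy : pvDim y)
    (h1 : pvLe x y) (h2 : pvLe y x) : x = y := by
  apply pvGrid_ext hx hy
  intro r c hr hc
  rcases h1 r c hr hc with h' | h'
  · exact h'
  · rcases h2 r c hr hc with h'' | h''
    · exact h''.symm
    · rw [h', h'']


-- ===== VERDICT (by name: the statement is the Claim_ definition above) =====
theorem compute_control_spec : Claim_equal_compute_control := by
  intro board _dom hpre
  unfold Spec_compute_control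
  set s0 : List (List String) :=
    (List.range 4).map (fun r => (List.range 4).map (fun c => pvGeti board r c)) with hs0
  have hcopy := pvCopy_eq hpre
  have hdim : pvDim s0 := pvCopy_dim board
  have hgood0 : pvGood s0 s0 := ⟨hdim, pvProg_refl s0, fun r c hr hc h => absurd rfl h⟩
  have hcnt : pvEmptyCount s0 < 17 := lt_of_le_of_lt (pvEmptyCount_le s0) (by omega)
  have hA := pvLoopA_basic s0 17 s0 hgood0 hcnt
  have hB := pvLoopJ_basic s0 17 s0 hgood0 hcnt
  have hAB : pvLe (pvLoopA 17 s0) (pvLoopJ 17 s0) :=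
    pvLoopA_le s0 _ hB.1 hB.2 17 s0 hgood0 (pvProg_le hB.1.2.1)
  have hBA : pvLe (pvLoopJ 17 s0) (pvLoopA 17 s0) :=
    pvLoopJ_le s0 _ hA.1 hA.2 17 s0 hgood0 (pvProg_le hA.1.2.1)
  have : pvLoopA 17 s0 = pvLoopJ 17 s0 :=
    pvLe_antisymm hA.1.1 hB.1.1 hAB hBA
  show compute_control board = compute_control_alt board
  unfold compute_control compute_control_alt
  rw [hcopy, ← hs0, this]
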